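-- pv_equiv track=rewrite | github.com/NWU-MuST/ttslab2 | ttslab/postagger.py | load_csv
-- ===== SOURCE A (Python) =====
-- def load_csv(text, sep="\t"):
--     sentences = [[[], []]]
--     for line in text.splitlines():
--         if line.strip() == "":
--             sentences.append([[], []])
--             continue
--         word, tag = line.split(sep)
--         sentences[-1][0].append(word)
--         sentences[-1][1].append(tag)
--     if sentences[-1] == []:
--         sentences.pop(-1)
--     return sentences
-- ===== SOURCE B (Python) =====
-- def load_csv(text, sep="\t"):
--     groups = [[]]
--     for line in text.splitlines():
--         if line.strip() == "":
--             groups.append([])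
--         else:
--             groups[-1].append(line.split(sep))
--     sentences = []
--     for g in groups:
--         words = [w for w, t in g]
--         tags = [t for w, t in g]
--         sentences.append([words, tags])
--     return sentences
-- ===== Notes on version B (the rewrite author's own statement) =====
-- stated objective: alternative
-- what changed: A builds each [words,tags] sentence incrementally with in-place appends inside one loop; B does two passes: first partitions lines into groups of raw split rows, then transposes each group into [words,tags].
import Mathlib
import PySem

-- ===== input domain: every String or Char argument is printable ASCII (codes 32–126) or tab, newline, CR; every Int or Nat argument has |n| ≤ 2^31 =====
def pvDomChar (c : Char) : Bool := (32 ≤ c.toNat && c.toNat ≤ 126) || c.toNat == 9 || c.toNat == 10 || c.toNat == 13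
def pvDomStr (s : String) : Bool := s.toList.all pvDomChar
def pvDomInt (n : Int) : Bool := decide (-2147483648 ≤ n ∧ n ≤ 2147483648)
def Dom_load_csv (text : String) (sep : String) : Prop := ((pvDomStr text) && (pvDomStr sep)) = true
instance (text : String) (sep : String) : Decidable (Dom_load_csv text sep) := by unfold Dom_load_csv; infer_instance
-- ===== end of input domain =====

-- B is a two-pass decomposition (partition lines into raw-row groups, then transpose each group);
-- same cost, chosen for clarity (objective: alternative).

-- ===== PORT A =====
-- one fold step of A's loop: blank line starts a new sentence, otherwise append word/tag to the last one
def loadStepA (sentences : List (List (List String))) (line : String) (sep : String) :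
    List (List (List String)) :=
  if PySem.Str.strip line = "" then sentences ++ [[[], []]]
  else
    match PySem.Str.split? line sep with
    | some [word, tag] =>
        -- sentences[-1][0].append(word); sentences[-1][1].append(tag)
        sentences.dropLast ++
          [match sentences.getLast? with
           | some [ws, ts] => [ws ++ [word], ts ++ [tag]]
           | _ => []]
    | _ => sentences   -- ValueError in Python (unpacking); excluded by Pre_

def load_csv (text : String) (sep : String) : List (List (List String)) :=
  let sentences := (PySem.Str.splitlines text).foldl (fun s l => loadStepA s l sep) [[[], []]]
  if sentences.getLast? = some [] then sentences.dropLast else sentences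

-- ===== PORT B =====
-- 'w' of a two-field row (Python's 'for w, t in g' unpacking; excluded by Pre_ otherwise)
def pvRow0 (r : List String) : String := match r with | [w, _] => w | _ => ""
def pvRow1 (r : List String) : String := match r with | [_, t] => t | _ => ""

-- one fold step of B's first pass: group raw rows between blank lines
def loadStepB (gs : List (List (List String))) (line : String) (sep : String) :
    List (List (List String)) :=
  if PySem.Str.strip line = "" then gs ++ [[]]
  else gs.dropLast ++ [gs.getLastD [] ++ [(PySem.Str.split? line sep).getD []]]

def load_csv_alt (text : String) (sep : String) : List (List (List String)) :=
  let groups := (PySem.Str.splitlines text).foldl (fun gs l => loadStepB gs l sep) [[]]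
  groups.map (fun g => [g.map pvRow0, g.map pvRow1])

-- ===== PRECONDITION & SPEC =====
-- Pre_ excludes exactly the inputs where Python A raises ValueError: a non-blank line whose
-- split by sep does not give exactly two fields (including sep = "" with a non-blank line).
def Pre_load_csv (text : String) (sep : String) : Prop :=
  ∀ line ∈ PySem.Str.splitlines text, PySem.Str.strip line ≠ "" →
    (PySem.Str.split? line sep).map List.length = some 2

instance (text : String) (sep : String) : Decidable (Pre_load_csv text sep) := by
  unfold Pre_load_csv; infer_instance

def pvWitness_load_csv : String × String := ("a\tb\n\nc\td", "\t")

def Spec_load_csv (text : String) (sep : String) (out : List (List (List String))) : Prop :=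
  out = load_csv_alt text sep
instance (text : String) (sep : String) (out : List (List (List String))) : Decidable (Spec_load_csv text sep out) := by unfold Spec_load_csv; infer_instance

-- ===== CLAIM (what is proved, stated in full; the proofs are below) =====
def Claim_equal_load_csv : Prop := ∀ (text : String) (sep : String), Dom_load_csv text sep → Pre_load_csv text sep → Spec_load_csv text sep (load_csv text sep)

-- ===== LEMMAS AND PROOFS =====

-- the transpose B applies to one group
def pvTrans (g : List (List String)) : List (List String) := [g.map pvRow0, g.map pvRow1]

lemma stepB_ne_nil (gs : List (List (List String))) (line sep : String) :
    loadStepB gs line sep ≠ [] := by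
  unfold loadStepB; split <;> simp

lemma step_eq (gs : List (List (List String))) (line sep : String) (hne : gs ≠ [])
    (hgood : PySem.Str.strip line ≠ "" → (PySem.Str.split? line sep).map List.length = some 2) :
    loadStepA (gs.map pvTrans) line sep = (loadStepB gs line sep).map pvTrans := by
  unfold loadStepA loadStepB
  by_cases hb : PySem.Str.strip line = ""
  · simp [hb, pvTrans]
  · simp only [hb, if_false]
    obtain ⟨l, g, rfl⟩ : ∃ (l : List (List (List String))) (g : List (List String)), gs = l ++ [g] := by
      rcases List.eq_nil_or_concat gs with h | ⟨l, g, h⟩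
      · exact absurd h hne
      · exact ⟨l, g, by simpa using h⟩
    have := hgood hb
    match hsp : PySem.Str.split? line sep with
    | none => simp [hsp] at this
    | some r =>
      simp only [hsp, Option.map_some, Option.some.injEq] at this
      match r, this with
      | [w, t], _ =>
        simp [pvTrans, pvRow0, pvRow1, List.getLastD_eq_getLast?, List.getLast?_append]

lemma fold_eq (lines : List String) (sep : String) :
    ∀ gs : List (List (List String)), gs ≠ [] →
    (∀ l ∈ lines, PySem.Str.strip l ≠ "" → (PySem.Str.split? l sep).map List.length = some 2) →
    lines.foldl (fun s l => loadStepA s l sep) (gs.map pvTrans)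
      = (lines.foldl (fun s l => loadStepB s l sep) gs).map pvTrans := by
  induction lines with
  | nil => intro gs _ _; simp
  | cons line rest ih =>
    intro gs hne hgood
    simp only [List.foldl_cons]
    rw [step_eq gs line sep hne (hgood line (by simp))]
    exact ih _ (stepB_ne_nil gs line sep) (fun l hl => hgood l (List.mem_cons_of_mem _ hl))

lemma foldB_ne_nil (lines : List String) (sep : String) :
    ∀ gs : List (List (List String)), gs ≠ [] →
    lines.foldl (fun s l => loadStepB s l sep) gs ≠ [] := by
  induction lines with
  | nil => intro gs h; simpa
  | cons line rest ih =>
    intro gs _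
    exact ih _ (stepB_ne_nil gs line sep)

-- ===== VERDICT (by name: the statement is the Claim_ definition above) =====
theorem load_csv_spec : Claim_equal_load_csv := by
  intro text sep _ hpre
  unfold Spec_load_csv load_csv load_csv_alt
  have h0 : ([[[], []]] : List (List (List String))) = ([[]] : List (List (List String))).map pvTrans := by
    simp [pvTrans]
  rw [h0, fold_eq _ sep [[]] (by simp) hpre]
  set G := (PySem.Str.splitlines text).foldl (fun s l => loadStepB s l sep) [[]] with hG
  have hne : G ≠ [] := foldB_ne_nil _ sep [[]] (by simp)
  have : (G.map pvTrans).getLast? ≠ some [] := by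
    rw [List.getLast?_map]
    rcases h : G.getLast? with _ | g
    · simp
    · simp [pvTrans]
  rw [if_neg this]
  simp [pvTrans]
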